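-- pv_equiv track=rewrite | github.com/XOM91K/EGE | Vadim_Ege_2026/19-21/19-21_7.py | f
-- ===== SOURCE A (Python) =====
-- def f(s,p):#21
--   if s <= 1 and (p== 2 or p == 4):
--     return 1
--   if s <= 1 and (p==1 or p==3):
--     return 0
--   if s > 1 and p == 4:
--     return 0
--   if p%2==0:
--       if s >= 4 and s % 3 == 0:
--           return f(s-4,p+1) and f(s-1,p+1) and f(s//3,p+1)
--       elif s >= 4:
--           return f(s - 4, p + 1) and f(s - 1, p + 1)
--       elif s % 3 == 0:
--           return f(s - 1, p + 1) and f(s//3,p+1)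
--       else:
--           return f(s-1,p+1)
--   else:
--       if s >= 4 and s % 3 == 0:
--           return f(s-4,p+1) or f(s-1,p+1) or f(s//3,p+1)
--       elif s >= 4:
--           return f(s - 4, p + 1) or f(s - 1, p + 1)
--       elif s % 3 == 0:
--           return f(s - 1, p + 1) or f(s//3,p+1)
--       else:
--           return f(s-1,p+1)
-- ===== SOURCE B (Python) =====
-- def f(s, p):
--     cache = {}
--
--     def g(s, q):
--         key = (s, q)
--         if key in cache:
--             return cache[key]
--         if s <= 1 and q in (1, 2, 3, 4):
--             v = 1 - q % 2
--         elif q == 4: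
--             v = 0
--         else:
--             moves = [s - 1]
--             if s >= 4:
--                 moves.append(s - 4)
--             if s % 3 == 0:
--                 moves.append(s // 3)
--             v = g(moves[0], q + 1)
--             for m in moves[1:]:
--                 r = g(m, q + 1)
--                 v = (v and r) if q % 2 == 0 else (v or r)
--         cache[key] = v
--         return v
--
--     return g(s, p)
-- ===== Notes on version B (the rewrite author's own statement) =====
-- stated objective: alternative
-- what changed: Replaced A's naive eight-branch recursion by memoized (dynamic-programming) evaluation keyed by (state, ply) with uniform move-list generation and a parity-selected reduction, so repeated positions are computed once.
-- outside the precondition, e.g. on f(2, 5): A raises RecursionError, B raises RecursionError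
import Mathlib
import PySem

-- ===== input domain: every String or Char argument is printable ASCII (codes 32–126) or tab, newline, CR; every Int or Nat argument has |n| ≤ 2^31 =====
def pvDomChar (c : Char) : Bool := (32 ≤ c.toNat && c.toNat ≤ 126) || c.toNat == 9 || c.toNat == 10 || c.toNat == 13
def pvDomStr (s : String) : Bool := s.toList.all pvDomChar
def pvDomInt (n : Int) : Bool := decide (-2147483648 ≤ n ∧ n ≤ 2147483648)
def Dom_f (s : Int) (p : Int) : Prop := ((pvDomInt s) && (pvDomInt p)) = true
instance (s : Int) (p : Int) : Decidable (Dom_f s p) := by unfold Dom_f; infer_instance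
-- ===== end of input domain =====

-- B replaces A's naive eight-branch game recursion by memoized (dynamic-programming) evaluation over (state, ply) keys with uniform move-list generation and a parity-selected reduction; same values, avoids recomputing repeated positions.


-- Python's `x and y` / `x or y` on ints (value semantics; exact)
def pyAnd (a b : Int) : Int := if a = 0 then a else b
def pyOr (a b : Int) : Int := if a = 0 then b else a

-- ===== PORT A =====
-- Fuel (5 - p).toNat bounds the recursion depth: every call increments p and the
-- function always returns once p = 4, so on Pre_f the fuel never runs out; the
-- fuel-0 value 0 is unreachable junk, a totality guard only.
def fAux : Nat → Int → Int → Int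
  | 0, _, _ => 0
  | n+1, s, p =>
    if s ≤ 1 ∧ (p = 2 ∨ p = 4) then 1
    else if s ≤ 1 ∧ (p = 1 ∨ p = 3) then 0
    else if s > 1 ∧ p = 4 then 0
    else if PySem.Int.mod p 2 = 0 then
      if s ≥ 4 ∧ PySem.Int.mod s 3 = 0 then
        pyAnd (pyAnd (fAux n (s-4) (p+1)) (fAux n (s-1) (p+1))) (fAux n (PySem.Int.floordiv s 3) (p+1))
      else if s ≥ 4 then
        pyAnd (fAux n (s-4) (p+1)) (fAux n (s-1) (p+1))
      else if PySem.Int.mod s 3 = 0 then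
        pyAnd (fAux n (s-1) (p+1)) (fAux n (PySem.Int.floordiv s 3) (p+1))
      else fAux n (s-1) (p+1)
    else
      if s ≥ 4 ∧ PySem.Int.mod s 3 = 0 then
        pyOr (pyOr (fAux n (s-4) (p+1)) (fAux n (s-1) (p+1))) (fAux n (PySem.Int.floordiv s 3) (p+1))
      else if s ≥ 4 then
        pyOr (fAux n (s-4) (p+1)) (fAux n (s-1) (p+1))
      else if PySem.Int.mod s 3 = 0 then
        pyOr (fAux n (s-1) (p+1)) (fAux n (PySem.Int.floordiv s 3) (p+1))
      else fAux n (s-1) (p+1)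

def f (s : Int) (p : Int) : Int := fAux (5 - p).toNat s p

-- ===== PORT B =====
-- B's cache dict (Python: cache = {}, keyed by (s, q))
abbrev FCache := PySem.Dict (Int × Int) Int

-- transliteration of B's inner memoized g(s, q); the mutable dict is threaded
-- through as state; fuel (5 - q).toNat is the same totality guard as on A's side
def gAux : Nat → Int → Int → FCache → Int × FCache
  | 0, _, _, c => (0, c)
  | n+1, s, q, c =>
    match c.get? (s, q) with
    | some v => (v, c)            -- if key in cache: return cache[key]
    | none =>
      let vc : Int × FCache :=
        if s ≤ 1 ∧ (q = 1 ∨ q = 2 ∨ q = 3 ∨ q = 4) then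
          (1 - PySem.Int.mod q 2, c)
        else if q = 4 then
          (0, c)
        else
          -- moves = [s-1] (+ [s-4] if s >= 4) (+ [s//3] if s % 3 == 0); moves[0] = s-1
          let moves : List Int :=
            [s - 1] ++ (if s ≥ 4 then [s - 4] else []) ++
              (if PySem.Int.mod s 3 = 0 then [PySem.Int.floordiv s 3] else [])
          let vc0 := gAux n (s - 1) (q + 1) c
          (moves.drop 1).foldl
            (fun (ac : Int × FCache) m =>
              let rc := gAux n m (q + 1) ac.2
              ((if PySem.Int.mod q 2 = 0 then pyAnd ac.1 rc.1 else pyOr ac.1 rc.1), rc.2))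
            vc0
      (vc.1, vc.2.insert (s, q) vc.1)   -- cache[key] = v; return v

def f_alt (s : Int) (p : Int) : Int := (gAux (5 - p).toNat s p PySem.Dict.empty).1

-- ===== PRECONDITION & SPEC =====
-- Pre_f excludes p > 4, where A never reaches a base case and raises
-- RecursionError, and p < -900, where A's recursion depth 4 - p is at or beyond
-- CPython's default recursion limit of 1000 and A raises RecursionError (the
-- bound -900 keeps a safety margin below the exact interpreter-dependent limit).
def Pre_f (s : Int) (p : Int) : Prop := -900 ≤ p ∧ p ≤ 4
instance (s : Int) (p : Int) : Decidable (Pre_f s p) := by unfold Pre_f; infer_instance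

def pvWitness_f : Int × Int := (11, 1)

def Spec_f (s : Int) (p : Int) (out : Int) : Prop := out = f_alt s p
instance (s : Int) (p : Int) (out : Int) : Decidable (Spec_f s p out) := by unfold Spec_f; infer_instance

-- ===== CLAIM (what is proved, stated in full; the proofs are below) =====
def Claim_equal_f : Prop := ∀ (s : Int) (p : Int), Dom_f s p → Pre_f s p → Spec_f s p (f s p)

-- ===== LEMMAS AND PROOFS =====

lemma pyAnd01 {a b : Int} (ha : a = 0 ∨ a = 1) (hb : b = 0 ∨ b = 1) :
    pyAnd a b = 0 ∨ pyAnd a b = 1 := by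
  rcases ha with h | h <;> rcases hb with h' | h' <;> simp [pyAnd, h, h']

lemma pyOr01 {a b : Int} (ha : a = 0 ∨ a = 1) (hb : b = 0 ∨ b = 1) :
    pyOr a b = 0 ∨ pyOr a b = 1 := by
  rcases ha with h | h <;> rcases hb with h' | h' <;> simp [pyOr, h, h']

-- every value A's port produces is 0 or 1
lemma fAux01 : ∀ (n : Nat) (s p : Int), fAux n s p = 0 ∨ fAux n s p = 1 := by
  intro n
  induction n with
  | zero => intro s p; left; rfl
  | succ n ih =>
    intro s p
    simp only [fAux]
    split_ifs <;>
      first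
        | (left; rfl)
        | (right; rfl)
        | exact pyAnd01 (pyAnd01 (ih _ _) (ih _ _)) (ih _ _)
        | exact pyAnd01 (ih _ _) (ih _ _)
        | exact pyOr01 (pyOr01 (ih _ _) (ih _ _)) (ih _ _)
        | exact pyOr01 (ih _ _) (ih _ _)
        | exact ih _ _

lemma f01 (s p : Int) : f s p = 0 ∨ f s p = 1 := fAux01 _ s p

lemma pyAnd_comm01 (a b : Int) (ha : a = 0 ∨ a = 1) (hb : b = 0 ∨ b = 1) :
    pyAnd a b = pyAnd b a := by
  rcases ha with h | h <;> rcases hb with h' | h' <;> simp [pyAnd, h, h']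

lemma pyOr_comm01 (a b : Int) (ha : a = 0 ∨ a = 1) (hb : b = 0 ∨ b = 1) :
    pyOr a b = pyOr b a := by
  rcases ha with h | h <;> rcases hb with h' | h' <;> simp [pyOr, h, h']

-- the cache invariant: every stored value is the (A-semantics) game value
def FGood (c : FCache) : Prop := ∀ a b v, c.get? (a, b) = some v → v = f a b

lemma fgood_empty : FGood PySem.Dict.empty := by
  intro a b v h
  simp [PySem.Dict.get?_empty] at h

lemma fgood_insert {c : FCache} (h : FGood c) (s q : Int) (v : Int) (hv : v = f s q) :
    FGood (c.insert (s, q) v) := by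
  intro a b w hw
  rw [PySem.Dict.get?_insert] at hw
  by_cases hab : (a, b) = (s, q)
  · rw [if_pos hab] at hw
    obtain ⟨rfl, rfl⟩ := Prod.mk.injEq .. ▸ hab
    cases hw; exact hv
  · rw [if_neg hab] at hw
    exact h a b w hw

-- A's canonical-fuel value satisfies the recursion equation (children at p+1
-- carry fuel (5-(p+1)).toNat = (4-p).toNat, i.e. are again canonical)
lemma f_eq (s p : Int) (hp : p ≤ 4) :
    f s p =
      if s ≤ 1 ∧ (p = 2 ∨ p = 4) then 1
      else if s ≤ 1 ∧ (p = 1 ∨ p = 3) then 0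
      else if s > 1 ∧ p = 4 then 0
      else if PySem.Int.mod p 2 = 0 then
        if s ≥ 4 ∧ PySem.Int.mod s 3 = 0 then
          pyAnd (pyAnd (f (s-4) (p+1)) (f (s-1) (p+1))) (f (PySem.Int.floordiv s 3) (p+1))
        else if s ≥ 4 then
          pyAnd (f (s-4) (p+1)) (f (s-1) (p+1))
        else if PySem.Int.mod s 3 = 0 then
          pyAnd (f (s-1) (p+1)) (f (PySem.Int.floordiv s 3) (p+1))
        else f (s-1) (p+1)
      else
        if s ≥ 4 ∧ PySem.Int.mod s 3 = 0 then
          pyOr (pyOr (f (s-4) (p+1)) (f (s-1) (p+1))) (f (PySem.Int.floordiv s 3) (p+1))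
        else if s ≥ 4 then
          pyOr (f (s-4) (p+1)) (f (s-1) (p+1))
        else if PySem.Int.mod s 3 = 0 then
          pyOr (f (s-1) (p+1)) (f (PySem.Int.floordiv s 3) (p+1))
        else f (s-1) (p+1) := by
  have h5 : (5 - p).toNat = (4 - p).toNat + 1 := by omega
  have h4 : (5 - (p + 1)).toNat = (4 - p).toNat := by omega
  unfold f
  rw [h5, h4]
  rfl

-- the fold over the tail of the move list: its value is the pure fold of the
-- children's game values, and the threaded cache stays good
lemma gFold_spec (n : Nat) (q : Int)
    (IH : ∀ (s q' : Int) (c : FCache), q' ≤ 4 → (5 - q').toNat ≤ n → FGood c →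
      (gAux n s q' c).1 = f s q' ∧ FGood (gAux n s q' c).2)
    (hq : q + 1 ≤ 4) (hn : (5 - (q + 1)).toNat ≤ n) :
    ∀ (ms : List Int) (ac : Int × FCache), FGood ac.2 →
      (ms.foldl (fun (ac : Int × FCache) m =>
          let rc := gAux n m (q + 1) ac.2
          ((if PySem.Int.mod q 2 = 0 then pyAnd ac.1 rc.1 else pyOr ac.1 rc.1), rc.2)) ac).1
        = ms.foldl (fun a m =>
            if PySem.Int.mod q 2 = 0 then pyAnd a (f m (q + 1)) else pyOr a (f m (q + 1))) ac.1
      ∧ FGood ((ms.foldl (fun (ac : Int × FCache) m =>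
          let rc := gAux n m (q + 1) ac.2
          ((if PySem.Int.mod q 2 = 0 then pyAnd ac.1 rc.1 else pyOr ac.1 rc.1), rc.2)) ac).2) := by
  intro ms
  induction ms with
  | nil => intro ac h; exact ⟨rfl, h⟩
  | cons m ms ihm =>
    intro ac hgc
    obtain ⟨hv, hg⟩ := IH m (q + 1) ac.2 hq hn hgc
    simp only [List.foldl_cons]
    obtain ⟨h1, h2⟩ := ihm
      ((if PySem.Int.mod q 2 = 0 then pyAnd ac.1 (gAux n m (q + 1) ac.2).1
          else pyOr ac.1 (gAux n m (q + 1) ac.2).1), (gAux n m (q + 1) ac.2).2) hg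
    refine ⟨?_, h2⟩
    rw [h1, hv]

-- the heart of the proof: memoized evaluation returns A's game value and keeps
-- the cache good, given enough fuel (canonical fuel (5-q).toNat, q ≤ 4)
lemma gAux_spec : ∀ (n : Nat) (s q : Int) (c : FCache), q ≤ 4 → (5 - q).toNat ≤ n → FGood c →
    (gAux n s q c).1 = f s q ∧ FGood (gAux n s q c).2 := by
  intro n
  induction n with
  | zero => intro s q c hq hn hc; exfalso; omega
  | succ n ih =>
    intro s q c hq hn hc
    cases hget : c.get? (s, q) with
    | some v =>
      simp only [gAux, hget]
      exact ⟨hc s q v hget, hc⟩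
    | none =>
      simp only [gAux, hget]
      by_cases hb1 : s ≤ 1 ∧ (q = 1 ∨ q = 2 ∨ q = 3 ∨ q = 4)
      · have hval : 1 - PySem.Int.mod q 2 = f s q := by
          obtain ⟨hs, hq14⟩ := hb1
          rw [f_eq s q hq]
          rcases hq14 with rfl | rfl | rfl | rfl
          · rw [if_neg (by omega), if_pos (show s ≤ 1 ∧ ((1:Int) = 1 ∨ (1:Int) = 3) by omega)]
            decide
          · rw [if_pos (show s ≤ 1 ∧ ((2:Int) = 2 ∨ (2:Int) = 4) by omega)]; decide
          · rw [if_neg (by omega), if_pos (show s ≤ 1 ∧ ((3:Int) = 1 ∨ (3:Int) = 3) by omega)]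
            decide
          · rw [if_pos (show s ≤ 1 ∧ ((4:Int) = 2 ∨ (4:Int) = 4) by omega)]; decide
        simp only [if_pos hb1]
        exact ⟨hval, fgood_insert hc s q _ hval⟩
      · by_cases hq4 : q = 4
        · have hs1 : 1 < s := by
            by_contra hs
            exact hb1 ⟨by omega, by tauto⟩
          have hval : (0 : Int) = f s q := by
            rw [f_eq s q hq, if_neg (by rintro ⟨h1, _⟩; omega),
              if_neg (by rintro ⟨h1, _⟩; omega), if_pos ⟨hs1, hq4⟩]
          simp only [if_neg hb1, if_pos hq4]
          exact ⟨hval, fgood_insert hc s q _ hval⟩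
        · -- recursive branch: q ≤ 3, moves = [s-1] (+ [s-4]) (+ [s//3])
          have hA1 : ¬(s ≤ 1 ∧ (q = 2 ∨ q = 4)) := by
            rintro ⟨h1, h2⟩; exact hb1 ⟨h1, by tauto⟩
          have hA2 : ¬(s ≤ 1 ∧ (q = 1 ∨ q = 3)) := by
            rintro ⟨h1, h2⟩; exact hb1 ⟨h1, by tauto⟩
          have hA3 : ¬(s > 1 ∧ q = 4) := by rintro ⟨_, h2⟩; exact hq4 h2
          obtain ⟨hv0, hg0⟩ := ih (s - 1) (q + 1) c (by omega) (by omega) hc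
          by_cases h4 : s ≥ 4 <;> by_cases h3 : PySem.Int.mod s 3 = 0
          · -- s ≥ 4 and s % 3 == 0
            obtain ⟨hf1, hf2⟩ := gFold_spec n q ih (by omega) (by omega)
              [s - 4, PySem.Int.floordiv s 3] (gAux n (s - 1) (q + 1) c) hg0
            simp only [if_neg hb1, if_neg hq4, if_pos h4, if_pos h3, List.cons_append,
              List.nil_append, List.drop_succ_cons, List.drop_zero]
            refine ⟨?_, fgood_insert hf2 s q _ ?_⟩ <;>
            · rw [hf1, hv0]
              simp only [List.foldl_cons, List.foldl_nil]
              rw [f_eq s q hq, if_neg hA1, if_neg hA2, if_neg hA3]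
              by_cases hp : PySem.Int.mod q 2 = 0
              · simp only [if_pos hp,
                  if_pos (show s ≥ 4 ∧ PySem.Int.mod s 3 = 0 from ⟨h4, h3⟩)]
                rw [pyAnd_comm01 (f (s - 1) (q + 1)) (f (s - 4) (q + 1)) (f01 _ _) (f01 _ _)]
              · simp only [if_neg hp,
                  if_pos (show s ≥ 4 ∧ PySem.Int.mod s 3 = 0 from ⟨h4, h3⟩)]
                rw [pyOr_comm01 (f (s - 1) (q + 1)) (f (s - 4) (q + 1)) (f01 _ _) (f01 _ _)]
          · -- s ≥ 4, s % 3 ≠ 0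
            obtain ⟨hf1, hf2⟩ := gFold_spec n q ih (by omega) (by omega)
              [s - 4] (gAux n (s - 1) (q + 1) c) hg0
            simp only [if_neg hb1, if_neg hq4, if_pos h4, if_neg h3, List.append_nil,
              List.cons_append, List.nil_append, List.drop_succ_cons, List.drop_zero]
            refine ⟨?_, fgood_insert hf2 s q _ ?_⟩ <;>
            · rw [hf1, hv0]
              simp only [List.foldl_cons, List.foldl_nil]
              rw [f_eq s q hq, if_neg hA1, if_neg hA2, if_neg hA3]
              by_cases hp : PySem.Int.mod q 2 = 0
              · simp only [if_pos hp,
                  if_neg (show ¬(s ≥ 4 ∧ PySem.Int.mod s 3 = 0) from fun h => h3 h.2),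
                  if_pos h4]
                rw [pyAnd_comm01 (f (s - 1) (q + 1)) (f (s - 4) (q + 1)) (f01 _ _) (f01 _ _)]
              · simp only [if_neg hp,
                  if_neg (show ¬(s ≥ 4 ∧ PySem.Int.mod s 3 = 0) from fun h => h3 h.2),
                  if_pos h4]
                rw [pyOr_comm01 (f (s - 1) (q + 1)) (f (s - 4) (q + 1)) (f01 _ _) (f01 _ _)]
          · -- s < 4, s % 3 == 0
            obtain ⟨hf1, hf2⟩ := gFold_spec n q ih (by omega) (by omega)
              [PySem.Int.floordiv s 3] (gAux n (s - 1) (q + 1) c) hg0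
            simp only [if_neg hb1, if_neg hq4, if_neg h4, if_pos h3, List.cons_append,
              List.nil_append, List.drop_succ_cons, List.drop_zero]
            refine ⟨?_, fgood_insert hf2 s q _ ?_⟩ <;>
            · rw [hf1, hv0]
              simp only [List.foldl_cons, List.foldl_nil]
              rw [f_eq s q hq, if_neg hA1, if_neg hA2, if_neg hA3]
              by_cases hp : PySem.Int.mod q 2 = 0
              · simp only [if_pos hp,
                  if_neg (show ¬(s ≥ 4 ∧ PySem.Int.mod s 3 = 0) from fun h => h4 h.1),
                  if_neg h4, if_pos h3]
              · simp only [if_neg hp,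
                  if_neg (show ¬(s ≥ 4 ∧ PySem.Int.mod s 3 = 0) from fun h => h4 h.1),
                  if_neg h4, if_pos h3]
          · -- s < 4, s % 3 ≠ 0
            simp only [if_neg hb1, if_neg hq4, if_neg h4, if_neg h3, List.append_nil,
              List.drop_succ_cons, List.drop_zero, List.foldl_nil]
            have hval : (gAux n (s - 1) (q + 1) c).1 = f s q := by
              rw [hv0, f_eq s q hq, if_neg hA1, if_neg hA2, if_neg hA3]
              by_cases hp : PySem.Int.mod q 2 = 0
              · simp only [if_pos hp,
                  if_neg (show ¬(s ≥ 4 ∧ PySem.Int.mod s 3 = 0) from fun h => h4 h.1),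
                  if_neg h4, if_neg h3]
              · simp only [if_neg hp,
                  if_neg (show ¬(s ≥ 4 ∧ PySem.Int.mod s 3 = 0) from fun h => h4 h.1),
                  if_neg h4, if_neg h3]
            exact ⟨hval, fgood_insert hg0 s q _ hval⟩

-- ===== VERDICT (by name: the statement is the Claim_ definition above) =====
theorem f_spec : Claim_equal_f := by
  intro s p _ hpre
  unfold Spec_f f_alt
  exact ((gAux_spec ((5 - p).toNat) s p PySem.Dict.empty hpre.2 le_rfl fgood_empty).1).symm
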